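-- pv_equiv track=rewrite | github.com/nilsgnh/AdventOfCode | 08/solve8.py | get_antenna_pairs
-- ===== SOURCE A (Python) =====
-- def get_antenna_pairs(antenna_positions):
--     antenna_pairs = {}
--     for (x1, y1), antenna1 in antenna_positions.items():
--         for (x2, y2), antenna2 in antenna_positions.items():
--             if (x1, y1) != (x2, y2) and antenna1 == antenna2:
--                 antenna_pairs[(x1, y1),(x2, y2)] = antenna1
--     antenna_pairs = {tuple(sorted(pair)): antenna for pair, antenna in antenna_pairs.items()} # sortiert Tupel nach Größe, damit keine doppelten Einträge
--     return antenna_pairs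
-- ===== SOURCE B (Python) =====
-- def get_antenna_pairs(antenna_positions):
--     # Group positions by frequency, then pair each position only with the
--     # later positions of its own bucket: O(n + number_of_pairs) instead of
--     # scanning all n^2 ordered pairs and deduplicating.
--     buckets = {}
--     for pos, ant in antenna_positions.items():
--         buckets.setdefault(ant, []).append(pos)
--     antenna_pairs = {}
--     seen = {}
--     for pos, ant in antenna_positions.items():
--         k = seen.get(ant, 0)
--         seen[ant] = k + 1
--         for other in buckets[ant][k + 1:]:
--             antenna_pairs[min(pos, other), max(pos, other)] = ant
--     return antenna_pairs
-- ===== Notes on version B (the rewrite author's own statement) =====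
-- stated objective: faster
-- what changed: B buckets the positions by antenna frequency once and pairs each position only with the later positions of its own bucket, instead of A's scan over all n^2 ordered position pairs followed by a second sorted-key deduplication pass over the resulting dict.
import Mathlib
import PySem

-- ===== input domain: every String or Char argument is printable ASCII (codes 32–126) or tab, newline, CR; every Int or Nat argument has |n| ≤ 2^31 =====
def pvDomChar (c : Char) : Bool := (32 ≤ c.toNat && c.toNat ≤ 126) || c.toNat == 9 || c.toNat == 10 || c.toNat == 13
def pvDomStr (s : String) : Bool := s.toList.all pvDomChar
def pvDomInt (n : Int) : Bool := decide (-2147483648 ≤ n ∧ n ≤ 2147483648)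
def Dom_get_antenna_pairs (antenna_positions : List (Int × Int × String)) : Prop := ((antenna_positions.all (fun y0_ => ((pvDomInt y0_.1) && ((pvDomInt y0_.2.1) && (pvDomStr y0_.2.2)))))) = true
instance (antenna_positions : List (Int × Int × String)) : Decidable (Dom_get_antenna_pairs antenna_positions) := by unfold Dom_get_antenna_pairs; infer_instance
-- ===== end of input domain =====

-- B groups the positions by antenna frequency and pairs each position only with the
-- later positions of its own bucket, instead of A's scan over all n^2 ordered pairs
-- followed by a sorted-key deduplication pass; equivalence is about the return value.

-- position key (x, y) of an entry
def pvKey (p : Int × Int × String) : Int × Int := (p.1, p.2.1)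
-- antenna frequency of an entry
def pvAnt (p : Int × Int × String) : String := p.2.2
-- Python tuple comparison (x1,y1) <= (x2,y2) on int pairs (lexicographic); exact
def pvLe (a b : Int × Int) : Bool := decide (a.1 < b.1 ∨ (a.1 = b.1 ∧ a.2 ≤ b.2))
-- tuple(sorted([a, b])) = (min(a, b), max(a, b)) for a two-element list; exact
def pvSort2 (a b : Int × Int) : (Int × Int) × (Int × Int) := if pvLe a b then (a, b) else (b, a)

-- ===== PORT A =====
def get_antenna_pairs (antenna_positions : List (Int × Int × String)) : List ((Int × Int) × (Int × Int) × String) :=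
  -- antenna_pairs = {}; nested loop over items() with conditional insert
  let d1 : PySem.Dict ((Int × Int) × (Int × Int)) String :=
    antenna_positions.foldl (fun d p =>
      antenna_positions.foldl (fun d q =>
        if pvKey p ≠ pvKey q ∧ pvAnt p = pvAnt q then d.insert (pvKey p, pvKey q) (pvAnt p) else d) d)
      PySem.Dict.empty
  -- antenna_pairs = {tuple(sorted(pair)): antenna for pair, antenna in antenna_pairs.items()}
  let d2 : PySem.Dict ((Int × Int) × (Int × Int)) String :=
    d1.items.foldl (fun d e => d.insert (pvSort2 e.1.1 e.1.2) e.2) PySem.Dict.empty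
  d2.items.map (fun e => (e.1.1, e.1.2, e.2))

-- ===== PORT B =====
def get_antenna_pairs_alt (antenna_positions : List (Int × Int × String)) : List ((Int × Int) × (Int × Int) × String) :=
  -- buckets: for pos, ant in items(): buckets.setdefault(ant, []).append(pos)
  -- (setdefault(k, []).append(x) is exactly d[k] = d.get(k, []) + [x], i.e. Dict.modify)
  let buckets : PySem.Dict String (List (Int × Int)) :=
    antenna_positions.foldl (fun d p => d.modify (pvAnt p) [] (· ++ [pvKey p])) PySem.Dict.empty
  let fin :=
    antenna_positions.foldl
      (fun (st : PySem.Dict String Int × PySem.Dict ((Int × Int) × (Int × Int)) String) p =>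
        let k := st.1.getD (pvAnt p) 0                              -- k = seen.get(ant, 0)
        let seen := st.1.insert (pvAnt p) (k + 1)                   -- seen[ant] = k + 1
        let others := PySem.List.slice (buckets.getD (pvAnt p) []) (some (k + 1)) none  -- buckets[ant][k+1:]
        (seen, others.foldl (fun r o => r.insert (pvSort2 (pvKey p) o) (pvAnt p)) st.2))
      (PySem.Dict.empty, PySem.Dict.empty)
  fin.2.items.map (fun e => (e.1.1, e.1.2, e.2))

-- ===== PRECONDITION & SPEC =====
-- Pre_ requires the position keys to be pairwise distinct: the Python argument is a dict
-- keyed by position, and an association list with duplicate keys represents no Python dict.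
def Pre_get_antenna_pairs (antenna_positions : List (Int × Int × String)) : Prop :=
  (antenna_positions.map pvKey).Nodup
instance (antenna_positions : List (Int × Int × String)) : Decidable (Pre_get_antenna_pairs antenna_positions) := by unfold Pre_get_antenna_pairs; infer_instance
def pvWitness_get_antenna_pairs : (List (Int × Int × String)) := [(0, 0, "a"), (1, 2, "a"), (3, 4, "b")]
def Spec_get_antenna_pairs (antenna_positions : List (Int × Int × String)) (out : List ((Int × Int) × (Int × Int) × String)) : Prop := out = get_antenna_pairs_alt antenna_positions
instance (antenna_positions : List (Int × Int × String)) (out : List ((Int × Int) × (Int × Int) × String)) : Decidable (Spec_get_antenna_pairs antenna_positions out) := by unfold Spec_get_antenna_pairs; infer_instance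

-- ===== CLAIM (what is proved, stated in full; the proofs are below) =====
def Claim_equal_get_antenna_pairs : Prop := ∀ (antenna_positions : List (Int × Int × String)), Dom_get_antenna_pairs antenna_positions → Pre_get_antenna_pairs antenna_positions → Spec_get_antenna_pairs antenna_positions (get_antenna_pairs antenna_positions)

-- ===== LEMMAS AND PROOFS =====

-- the common canonical result: for each entry, pair it with every later entry of the
-- same frequency, key sorted
def pvPairs : List (Int × Int × String) → List (((Int × Int) × (Int × Int)) × String)
  | [] => []
  | p :: rest =>
      (rest.filter (fun q => pvAnt q == pvAnt p)).map (fun q => (pvSort2 (pvKey p) (pvKey q), pvAnt p))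
      ++ pvPairs rest

-- key dedup with remembered seen keys (first occurrence wins), the shape of A's second pass
def pvDk {κ ν : Type} [DecidableEq κ] (seen : List κ) : List (κ × ν) → List (κ × ν)
  | [] => []
  | e :: xs => if e.1 ∈ seen then pvDk seen xs else e :: pvDk (e.1 :: seen) xs


-- ---- pvLe / pvSort2 facts ----

theorem pvLe_total (a b : Int × Int) (h : pvLe a b = false) : pvLe b a = true := by
  obtain ⟨a1, a2⟩ := a; obtain ⟨b1, b2⟩ := b
  simp [pvLe] at h ⊢; omega

theorem pvLe_antisymm (a b : Int × Int) (h1 : pvLe a b = true) (h2 : pvLe b a = true) : a = b := by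
  obtain ⟨a1, a2⟩ := a; obtain ⟨b1, b2⟩ := b
  simp [pvLe] at h1 h2
  simp [Prod.ext_iff]; omega

theorem pvSort2_comm (a b : Int × Int) (h : a ≠ b) : pvSort2 a b = pvSort2 b a := by
  by_cases hab : pvLe a b = true <;> by_cases hba : pvLe b a = true
  · exact absurd (pvLe_antisymm a b hab hba) h
  · simp [pvSort2, hab, hba]
  · simp [pvSort2, hab, hba]
  · exact absurd (pvLe_total a b (by simpa using hab)) (by simpa using hba)

theorem pvSort2_cases (a b : Int × Int) : pvSort2 a b = (a, b) ∨ pvSort2 a b = (b, a) := by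
  unfold pvSort2; split_ifs <;> simp

theorem pvSort2_eq {a b c d : Int × Int} (h : pvSort2 a b = pvSort2 c d) :
    (a = c ∧ b = d) ∨ (a = d ∧ b = c) := by
  rcases pvSort2_cases a b with h1 | h1 <;> rcases pvSort2_cases c d with h2 | h2 <;>
    rw [h1, h2] at h <;> simp only [Prod.ext_iff] at h <;> simp only [Prod.ext_iff] <;> tauto

theorem pv_key_inj {l : List (Int × Int × String)} (h : (l.map pvKey).Nodup)
    {p q : Int × Int × String} (hp : p ∈ l) (hq : q ∈ l) (he : pvKey p = pvKey q) : p = q :=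
  List.inj_on_of_nodup_map h hp hq he

theorem pv_mem_key {rest : List (Int × Int × String)} {x : Int × Int}
    (a : Int × Int × String) (ha : a ∈ rest) (h : pvKey a = x) : x ∈ rest.map pvKey := by
  rw [← h]; exact List.mem_map_of_mem ha

-- ---- generic fold-shape lemmas ----

theorem pv_foldl_if_insert {α κ ν : Type} [BEq κ] (c : α → Prop) [DecidablePred c]
    (k : α → κ) (v : α → ν) :
    ∀ (l : List α) (d : PySem.Dict κ ν),
      l.foldl (fun d q => if c q then d.insert (k q) (v q) else d) d
        = ((l.filter (fun q => decide (c q))).map (fun q => (k q, v q))).foldl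
            (fun d e => d.insert e.1 e.2) d := by
  intro l
  induction l with
  | nil => intro d; rfl
  | cons x xs ih =>
    intro d
    by_cases hx : c x <;> simp [hx, ih]

theorem pv_foldl_flatMap {α β γ : Type} (g : α → List β) (f : γ → β → γ) :
    ∀ (l : List α) (b : γ), (l.flatMap g).foldl f b = l.foldl (fun acc p => (g p).foldl f acc) b := by
  intro l
  induction l with
  | nil => intro b; rfl
  | cons x xs ih => intro b; simp [List.foldl_append, ih]

-- ---- inserting an already-present (key, value) pair is a no-op ----

theorem pv_insert_same {κ ν : Type} [BEq κ] [LawfulBEq κ] (d : PySem.Dict κ ν) (k : κ) (v : ν)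
    (hnd : d.keys.Nodup) (hget : d.get? k = some v) : d.insert k v = d := by
  have hc : d.contains k = true := by
    cases hcc : d.contains k
    · rw [(PySem.Dict.get?_eq_none_iff_contains _ _).mpr hcc] at hget; cases hget
    · rfl
  apply PySem.Dict.ext
  rw [PySem.Dict.items_insert, if_pos hc]
  conv_rhs => rw [← List.map_id d.items]
  apply List.map_congr_left
  intro p hp
  by_cases hpk : (p.1 == k) = true
  · have hpk' : p.1 = k := eq_of_beq hpk
    have hpget : d.get? p.1 = some p.2 := PySem.Dict.get?_of_mem_items _ (show (p.1, p.2) ∈ d.items by simpa using hp) hnd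
    rw [hpk', hget] at hpget
    obtain ⟨q1, q2⟩ := p
    simp at hpk' hpget
    simp [hpk', hpget]
  · simp [hpk]

-- ---- pvDk facts ----

theorem pv_dk_congr {κ ν : Type} [DecidableEq κ] :
    ∀ (xs : List (κ × ν)) (s1 s2 : List κ), (∀ e ∈ xs, (e.1 ∈ s1 ↔ e.1 ∈ s2)) →
      pvDk s1 xs = pvDk s2 xs := by
  intro xs
  induction xs with
  | nil => intros; rfl
  | cons e xs ih =>
    intro s1 s2 h
    have he := h e (by simp)
    by_cases h1 : e.1 ∈ s1
    · rw [pvDk, pvDk, if_pos h1, if_pos (he.mp h1)]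
      exact ih s1 s2 (fun e' he' => h e' (List.mem_cons_of_mem _ he'))
    · rw [pvDk, pvDk, if_neg h1, if_neg (fun hx => h1 (he.mpr hx))]
      congr 1
      apply ih
      intro e' he'
      simp only [List.mem_cons]
      rw [h e' (List.mem_cons_of_mem _ he')]

theorem pv_dk_fresh {κ ν : Type} [DecidableEq κ] :
    ∀ (xs : List (κ × ν)) (seen : List κ), (∀ e ∈ xs, e.1 ∉ seen) → (xs.map Prod.fst).Nodup →
      pvDk seen xs = xs := by
  intro xs
  induction xs with
  | nil => intros; rfl
  | cons e xs ih =>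
    intro seen h hnd
    rw [pvDk, if_neg (h e (by simp))]
    congr 1
    simp only [List.map_cons, List.nodup_cons] at hnd
    apply ih _ _ hnd.2
    intro e' he'
    simp only [List.mem_cons, not_or]
    exact ⟨fun hx => hnd.1 (hx ▸ List.mem_map_of_mem he'), h e' (List.mem_cons_of_mem _ he')⟩

theorem pv_dk_append {κ ν : Type} [DecidableEq κ] :
    ∀ (xs : List (κ × ν)) (s : List κ) (ys : List (κ × ν)),
      pvDk s (xs ++ ys) = pvDk s xs ++ pvDk ((pvDk s xs).map Prod.fst ++ s) ys := by
  intro xs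
  induction xs with
  | nil => intro s ys; simp [pvDk]
  | cons e xs ih =>
    intro s ys
    by_cases h1 : e.1 ∈ s
    · rw [List.cons_append, pvDk, if_pos h1, pvDk, if_pos h1, ih]
    · rw [List.cons_append, pvDk, if_neg h1, pvDk, if_neg h1, ih]
      rw [List.cons_append]
      refine congrArg (fun t => e :: (pvDk (e.1 :: s) xs ++ t)) ?_
      apply pv_dk_congr
      intro e' _
      simp only [List.map_cons, List.mem_append, List.mem_cons]
      tauto

theorem pv_dk_drop {κ ν : Type} [DecidableEq κ] :
    ∀ (xs : List (κ × ν)) (s : List κ) (ys : List (κ × ν)), (∀ e ∈ xs, e.1 ∈ s) →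
      pvDk s (xs ++ ys) = pvDk s ys := by
  intro xs
  induction xs with
  | nil => intros; rfl
  | cons e xs ih =>
    intro s ys h
    rw [List.cons_append, pvDk, if_pos (h e (by simp))]
    exact ih s ys (fun e' he' => h e' (List.mem_cons_of_mem _ he'))

theorem pv_dk_fold {κ ν : Type} [BEq κ] [LawfulBEq κ] [DecidableEq κ] :
    ∀ (xs : List (κ × ν)) (d : PySem.Dict κ ν), d.keys.Nodup →
      (∀ e ∈ xs, ∀ v, d.get? e.1 = some v → v = e.2) →
      (∀ e ∈ xs, ∀ e' ∈ xs, e.1 = e'.1 → e.2 = e'.2) →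
      (xs.foldl (fun d e => d.insert e.1 e.2) d).items = d.items ++ pvDk d.keys xs := by
  intro xs
  induction xs with
  | nil => intro d _ _ _; simp [pvDk]
  | cons e xs ih =>
    intro d hnd hdx hxx
    by_cases hc : d.contains e.1 = true
    · have hme : e.1 ∈ d.keys := (PySem.Dict.contains_iff_mem_keys _ _).mp hc
      obtain ⟨v, hv⟩ : ∃ v, d.get? e.1 = some v := by
        cases hgg : d.get? e.1
        · rw [(PySem.Dict.get?_eq_none_iff_contains _ _).mp hgg] at hc; cases hc
        · exact ⟨_, rfl⟩
      have hve : v = e.2 := hdx e (by simp) v hv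
      rw [List.foldl_cons, pv_insert_same d e.1 e.2 hnd (by rw [← hve]; exact hv)]
      rw [pvDk, if_pos hme]
      exact ih d hnd (fun e' he' => hdx e' (List.mem_cons_of_mem _ he'))
        (fun e' he' e'' he'' => hxx e' (List.mem_cons_of_mem _ he') e'' (List.mem_cons_of_mem _ he''))
    · have hc' : d.contains e.1 = false := by simpa using hc
      have hnme : e.1 ∉ d.keys := fun hx => hc ((PySem.Dict.contains_iff_mem_keys _ _).mpr hx)
      have hitems : (d.insert e.1 e.2).items = d.items ++ [(e.1, e.2)] := by
        rw [PySem.Dict.items_insert, if_neg (by simp [hc'])]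
      have hkeys : (d.insert e.1 e.2).keys = d.keys ++ [e.1] := by
        simp [PySem.Dict.keys, hitems]
      have hnd' : (d.insert e.1 e.2).keys.Nodup := by
        rw [hkeys, List.nodup_append]
        refine ⟨hnd, List.nodup_singleton _, ?_⟩
        intro a haa b hb
        rw [List.mem_singleton] at hb
        subst hb
        intro hae
        exact hnme (hae ▸ haa)
      rw [List.foldl_cons, ih (d.insert e.1 e.2) hnd' ?_ ?_]
      · rw [hitems, hkeys, pvDk, if_neg hnme]
        have hcg : pvDk (d.keys ++ [e.1]) xs = pvDk (e.1 :: d.keys) xs := by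
          apply pv_dk_congr; intro e' _; simp [List.mem_append, List.mem_cons]; tauto
        rw [hcg]
        simp [Prod.mk.eta, List.append_assoc]
      · intro e' he' v hv
        rw [PySem.Dict.get?_insert] at hv
        split_ifs at hv with hek
        · injection hv with h2
          rw [← h2]
          exact hxx e (by simp) e' (List.mem_cons_of_mem _ he') hek.symm
        · exact hdx e' (List.mem_cons_of_mem _ he') v hv
      · exact fun e' he' e'' he'' =>
          hxx e' (List.mem_cons_of_mem _ he') e'' (List.mem_cons_of_mem _ he'')

theorem pv_dk_interleave {α κ ν : Type} [DecidableEq κ] (opt g : α → List (κ × ν)) :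
    ∀ (l : List α) (s : List κ), (∀ q ∈ l, ∀ e ∈ opt q, e.1 ∈ s) →
      pvDk s (l.flatMap (fun q => opt q ++ g q)) = pvDk s (l.flatMap g) := by
  intro l
  induction l with
  | nil => intros; rfl
  | cons q l ih =>
    intro s h
    rw [List.flatMap_cons, List.flatMap_cons, List.append_assoc]
    rw [pv_dk_drop (opt q) s _ (h q (by simp))]
    rw [pv_dk_append (g q) s, pv_dk_append (g q) s]
    refine congrArg (fun t => pvDk s (g q) ++ t) ?_
    apply ih
    intro q' hq' e he
    exact List.mem_append_right _ (h q' (List.mem_cons_of_mem _ hq') e he)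

-- ---- specific fold-to-map reshaping (syntactic forms of the ports' loops) ----

theorem pv_d2_fold :
    ∀ (xs : List ((((Int × Int) × (Int × Int))) × String))
      (d : PySem.Dict ((Int × Int) × (Int × Int)) String),
      xs.foldl (fun d e => d.insert (pvSort2 e.1.1 e.1.2) e.2) d
        = (xs.map (fun e => (pvSort2 e.1.1 e.1.2, e.2))).foldl (fun d e => d.insert e.1 e.2) d := by
  intro xs
  induction xs with
  | nil => intro d; rfl
  | cons e xs ih => intro d; simp [ih]

theorem pv_bk_fold :
    ∀ (l : List (Int × Int × String)) (d : PySem.Dict String (List (Int × Int))),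
      l.foldl (fun d p => d.modify (pvAnt p) [] (· ++ [pvKey p])) d
        = (l.map (fun p => (pvAnt p, pvKey p))).foldl (fun d e => d.modify e.1 [] (· ++ [e.2])) d := by
  intro l
  induction l with
  | nil => intro d; rfl
  | cons p l ih => intro d; simp [ih]

theorem pv_inner_fold (p : Int × Int × String) :
    ∀ (ks : List (Int × Int)) (r : PySem.Dict ((Int × Int) × (Int × Int)) String),
      ks.foldl (fun r o => r.insert (pvSort2 (pvKey p) o) (pvAnt p)) r
        = (ks.map (fun o => (pvSort2 (pvKey p) o, pvAnt p))).foldl (fun d e => d.insert e.1 e.2) r := by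
  intro ks
  induction ks with
  | nil => intro r; rfl
  | cons o ks ih => intro r; simp [ih]

-- ---- the square list of A's first pass ----

def pvSqO (l aps : List (Int × Int × String)) : List (((Int × Int) × (Int × Int)) × String) :=
  l.flatMap (fun p => (aps.filter (fun q => decide (pvKey p ≠ pvKey q ∧ pvAnt p = pvAnt q))).map
    (fun q => ((pvKey p, pvKey q), pvAnt p)))

def pvSq (l aps : List (Int × Int × String)) : List (((Int × Int) × (Int × Int)) × String) :=
  l.flatMap (fun p => (aps.filter (fun q => decide (pvKey p ≠ pvKey q ∧ pvAnt p = pvAnt q))).map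
    (fun q => (pvSort2 (pvKey p) (pvKey q), pvAnt p)))

theorem pvSq_mem {l aps : List (Int × Int × String)} {e : ((Int × Int) × (Int × Int)) × String}
    (h : e ∈ pvSq l aps) :
    ∃ p q, p ∈ l ∧ q ∈ aps ∧ pvKey p ≠ pvKey q ∧ pvAnt p = pvAnt q ∧
      e = (pvSort2 (pvKey p) (pvKey q), pvAnt p) := by
  simp only [pvSq, List.mem_flatMap, List.mem_map, List.mem_filter, decide_eq_true_eq] at h
  obtain ⟨p, hp, q, ⟨hq, hne, hant⟩, he⟩ := h
  exact ⟨p, q, hp, hq, hne, hant, he.symm⟩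

theorem pvPairs_mem : ∀ {l : List (Int × Int × String)} {e : ((Int × Int) × (Int × Int)) × String},
    e ∈ pvPairs l → ∃ p q, p ∈ l ∧ q ∈ l ∧ e = (pvSort2 (pvKey p) (pvKey q), pvAnt p) := by
  intro l
  induction l with
  | nil => intro e h; cases h
  | cons p rest ih =>
    intro e h
    simp only [pvPairs] at h
    rcases List.mem_append.mp h with h | h
    · obtain ⟨q, hq, he⟩ := List.mem_map.mp h
      exact ⟨p, q, by simp, List.mem_cons_of_mem _ (List.mem_of_mem_filter hq), he.symm⟩
    · obtain ⟨a, b, ha, hb, he⟩ := ih h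
      exact ⟨a, b, List.mem_cons_of_mem _ ha, List.mem_cons_of_mem _ hb, he⟩

-- head-block keys are distinct
theorem pv_block_nodup (p : Int × Int × String) (rest : List (Int × Int × String))
    (hk : ((p :: rest).map pvKey).Nodup) (c : (Int × Int × String) → Bool) :
    ((rest.filter c).map (fun q => pvSort2 (pvKey p) (pvKey q))).Nodup := by
  simp only [List.map_cons, List.nodup_cons] at hk
  have hrest : rest.Nodup := hk.2.of_map _
  have hkr : (rest.map pvKey).Nodup := hk.2
  apply List.Nodup.map_on _ (hrest.filter c)
  intro q1 hq1 q2 hq2 he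
  have hq1' := List.mem_of_mem_filter hq1
  have hq2' := List.mem_of_mem_filter hq2
  rcases pvSort2_eq he with ⟨_, h2⟩ | ⟨h1, _⟩
  · exact pv_key_inj hkr hq1' hq2' h2
  · exact absurd (pv_mem_key q2 hq2' h1.symm) hk.1

theorem pv_sqO_nodup (aps : List (Int × Int × String)) (hka : (aps.map pvKey).Nodup) :
    ∀ l : List (Int × Int × String), (l.map pvKey).Nodup → ((pvSqO l aps).map Prod.fst).Nodup := by
  intro l
  induction l with
  | nil => intro _; simp [pvSqO]
  | cons p rest ih =>
    intro hk
    simp only [List.map_cons, List.nodup_cons] at hk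
    rw [pvSqO, List.flatMap_cons, List.map_append]
    apply List.Nodup.append
    · rw [List.map_map]
      have haps : aps.Nodup := hka.of_map _
      apply List.Nodup.map_on _ (haps.filter _)
      intro q1 hq1 q2 hq2 he
      simp only [Function.comp, Prod.mk.injEq] at he
      exact pv_key_inj hka (List.mem_of_mem_filter hq1) (List.mem_of_mem_filter hq2) he.2
    · exact ih hk.2
    · intro x hx1 hx2
      simp only [List.map_map, List.mem_map, Function.comp] at hx1
      obtain ⟨q, _, hxe⟩ := hx1
      simp only [List.map_flatMap, List.mem_flatMap, List.mem_map, Function.comp,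
        List.map_map] at hx2
      obtain ⟨p', hp', q', _, hxe'⟩ := hx2
      rw [← hxe] at hxe'
      have hpp : pvKey p' = pvKey p := by
        have := congrArg Prod.fst hxe'
        simpa using this
      exact hk.1 (pv_mem_key p' hp' hpp)

theorem pv_sq_consistent (aps : List (Int × Int × String)) (hk : (aps.map pvKey).Nodup) :
    ∀ e ∈ pvSq aps aps, ∀ e' ∈ pvSq aps aps, e.1 = e'.1 → e.2 = e'.2 := by
  intro e he e' he' hee
  obtain ⟨p, q, hp, hq, hne, hant, hee1⟩ := pvSq_mem he
  obtain ⟨p', q', hp', hq', hne', hant', hee2⟩ := pvSq_mem he'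
  rw [hee1, hee2]
  rw [hee1, hee2] at hee
  simp only at hee ⊢
  rcases pvSort2_eq hee with ⟨h1, _⟩ | ⟨h1, _⟩
  · rw [pv_key_inj hk hp hp' h1]
  · rw [pv_key_inj hk hp hq' h1, ← hant']

theorem pv_pairs_nodup : ∀ l : List (Int × Int × String), (l.map pvKey).Nodup →
    ((pvPairs l).map Prod.fst).Nodup := by
  intro l
  induction l with
  | nil => simp [pvPairs]
  | cons p rest ih =>
    intro hk
    have hk' := hk
    simp only [List.map_cons, List.nodup_cons] at hk'
    simp only [pvPairs, List.map_append]
    apply List.Nodup.append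
    · rw [List.map_map]
      exact pv_block_nodup p rest hk _
    · exact ih hk'.2
    · intro x hx1 hx2
      simp only [List.map_map, List.mem_map, Function.comp] at hx1
      obtain ⟨q, hq, hxe⟩ := hx1
      obtain ⟨ep, hepmem, hepeq⟩ := List.mem_map.mp hx2
      obtain ⟨a, b, ha, hb, hee⟩ := pvPairs_mem hepmem
      have hkey : pvSort2 (pvKey p) (pvKey q) = pvSort2 (pvKey a) (pvKey b) := by
        rw [hxe, ← hepeq, hee]
      rcases pvSort2_eq hkey with ⟨h1, _⟩ | ⟨h1, _⟩
      · exact hk'.1 (pv_mem_key a ha h1.symm)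
      · exact hk'.1 (pv_mem_key b hb h1.symm)

-- ---- the crux: deduplicating A's square list yields pvPairs ----

theorem pv_crux : ∀ aps : List (Int × Int × String), (aps.map pvKey).Nodup →
    pvDk [] (pvSq aps aps) = pvPairs aps := by
  intro aps
  induction aps with
  | nil => intro _; rfl
  | cons p rest ih =>
    intro hk
    have hk' := hk
    simp only [List.map_cons, List.nodup_cons] at hk'
    have hstep1 : pvSq (p :: rest) (p :: rest)
        = (rest.filter (fun q => decide (pvKey p ≠ pvKey q ∧ pvAnt p = pvAnt q))).map
            (fun q => (pvSort2 (pvKey p) (pvKey q), pvAnt p))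
          ++ pvSq rest (p :: rest) := by
      rw [pvSq, List.flatMap_cons, List.filter_cons]
      simp only [ne_eq, not_true_eq_false, false_and, decide_false]
      rfl
    set hb := (rest.filter (fun q => decide (pvKey p ≠ pvKey q ∧ pvAnt p = pvAnt q))).map
      (fun q => (pvSort2 (pvKey p) (pvKey q), pvAnt p)) with hhb
    have hbnodup : (hb.map Prod.fst).Nodup := by
      rw [hhb, List.map_map]; exact pv_block_nodup p rest hk _
    have hstep2 : pvSq rest (p :: rest)
        = rest.flatMap (fun q =>
            (if decide (pvKey q ≠ pvKey p ∧ pvAnt q = pvAnt p)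
              then [(pvSort2 (pvKey q) (pvKey p), pvAnt q)] else [])
            ++ (rest.filter (fun r => decide (pvKey q ≠ pvKey r ∧ pvAnt q = pvAnt r))).map
                (fun r => (pvSort2 (pvKey q) (pvKey r), pvAnt q))) := by
      rw [pvSq]
      congr 1
      funext q
      rw [List.filter_cons]
      split_ifs with hcq
      · simp
      · simp
    rw [hstep1, pv_dk_append]
    rw [pv_dk_fresh hb [] (by simp) hbnodup]
    rw [hstep2, pv_dk_interleave]
    · have hcongr : pvDk (hb.map Prod.fst ++ []) (rest.flatMap (fun q =>
          (rest.filter (fun r => decide (pvKey q ≠ pvKey r ∧ pvAnt q = pvAnt r))).map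
            (fun r => (pvSort2 (pvKey q) (pvKey r), pvAnt q))))
          = pvDk [] (pvSq rest rest) := by
        apply pv_dk_congr
        intro e he
        have he' : e ∈ pvSq rest rest := he
        obtain ⟨a, b, ha, hb', _, _, hee⟩ := pvSq_mem he'
        constructor
        · intro hmem
          exfalso
          rw [List.append_nil, hhb, List.map_map] at hmem
          obtain ⟨q, hq, hqe⟩ := List.mem_map.mp hmem
          have h1 : pvSort2 (pvKey p) (pvKey q) = e.1 := hqe
          have hkey : pvSort2 (pvKey p) (pvKey q) = pvSort2 (pvKey a) (pvKey b) := by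
            rw [h1, hee]
          rcases pvSort2_eq hkey with ⟨h1, _⟩ | ⟨h1, _⟩
          · exact hk'.1 (pv_mem_key a ha h1.symm)
          · exact hk'.1 (pv_mem_key b hb' h1.symm)
        · intro hx; cases hx
      rw [hcongr, ih hk'.2]
      refine congrArg (fun t => t ++ pvPairs rest) ?_
      rw [hhb]
      refine congrArg (List.map (fun q => (pvSort2 (pvKey p) (pvKey q), pvAnt p))) ?_
      apply List.filter_congr
      intro q hq
      have hne : pvKey p ≠ pvKey q := fun hx => hk'.1 (pv_mem_key q hq hx.symm)
      by_cases hant : pvAnt p = pvAnt q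
      · simp [hne, hant]
      · simp [hne, hant, Ne.symm hant]
    · intro q hq e he
      split_ifs at he with hcq
      · simp only [List.mem_singleton] at he
        simp only [decide_eq_true_eq] at hcq
        apply List.mem_append_left
        rw [hhb, List.map_map]
        have hmm : pvSort2 (pvKey p) (pvKey q)
            ∈ (rest.filter (fun r => decide (pvKey p ≠ pvKey r ∧ pvAnt p = pvAnt r))).map
              (fun r => pvSort2 (pvKey p) (pvKey r)) := by
          apply List.mem_map_of_mem
          rw [List.mem_filter]
          exact ⟨hq, by simp [Ne.symm hcq.1, hcq.2.symm]⟩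
        rw [he]
        rw [pvSort2_comm (pvKey q) (pvKey p) hcq.1]
        simpa using hmm
      · cases he

-- ---- A's two passes ----

theorem pv_d1 (aps : List (Int × Int × String)) (hk : (aps.map pvKey).Nodup) :
    (aps.foldl (fun d p =>
      aps.foldl (fun d q =>
        if pvKey p ≠ pvKey q ∧ pvAnt p = pvAnt q then d.insert (pvKey p, pvKey q) (pvAnt p) else d) d)
      PySem.Dict.empty).items = pvSqO aps aps := by
  have hF : (fun (d : PySem.Dict ((Int × Int) × (Int × Int)) String) p =>
      aps.foldl (fun d q =>
        if pvKey p ≠ pvKey q ∧ pvAnt p = pvAnt q then d.insert (pvKey p, pvKey q) (pvAnt p) else d) d)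
    = fun d p => ((aps.filter (fun q => decide (pvKey p ≠ pvKey q ∧ pvAnt p = pvAnt q))).map
          (fun q => ((pvKey p, pvKey q), pvAnt p))).foldl (fun d e => d.insert e.1 e.2) d :=
    funext fun d => funext fun p => pv_foldl_if_insert _ _ _ aps d
  rw [hF, ← pv_foldl_flatMap]
  have hfresh := PySem.Dict.items_foldl_insert_fresh (pvSqO aps aps) Prod.fst Prod.snd
    (PySem.Dict.empty : PySem.Dict ((Int × Int) × (Int × Int)) String)
    (by intro a _; simp) (pv_sqO_nodup aps hk aps hk)
  simp only [Prod.mk.eta] at hfresh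
  rw [show (aps.flatMap fun p =>
      (aps.filter (fun q => decide (pvKey p ≠ pvKey q ∧ pvAnt p = pvAnt q))).map
        (fun q => ((pvKey p, pvKey q), pvAnt p))) = pvSqO aps aps from rfl]
  rw [hfresh]
  simp [show (PySem.Dict.empty : PySem.Dict ((Int × Int) × (Int × Int)) String).items = [] from rfl]

theorem pv_map_sq (l aps : List (Int × Int × String)) :
    (pvSqO l aps).map (fun e => (pvSort2 e.1.1 e.1.2, e.2)) = pvSq l aps := by
  simp only [pvSqO, pvSq, List.map_flatMap, List.map_map]
  rfl

theorem pv_d2 (aps : List (Int × Int × String)) (hk : (aps.map pvKey).Nodup) :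
    ((pvSqO aps aps).foldl (fun d e => d.insert (pvSort2 e.1.1 e.1.2) e.2)
      (PySem.Dict.empty : PySem.Dict ((Int × Int) × (Int × Int)) String)).items = pvPairs aps := by
  rw [pv_d2_fold, pv_map_sq]
  rw [pv_dk_fold (pvSq aps aps) PySem.Dict.empty (by simp)
    (by intro e _ v hv; rw [PySem.Dict.get?_empty] at hv; cases hv)
    (pv_sq_consistent aps hk)]
  rw [show (PySem.Dict.empty : PySem.Dict ((Int × Int) × (Int × Int)) String).keys = [] from rfl]
  rw [pv_crux aps hk]
  simp [show (PySem.Dict.empty : PySem.Dict ((Int × Int) × (Int × Int)) String).items = [] from rfl]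

theorem pv_A_eq (aps : List (Int × Int × String)) (hk : (aps.map pvKey).Nodup) :
    get_antenna_pairs aps = (pvPairs aps).map (fun e => (e.1.1, e.1.2, e.2)) := by
  simp only [get_antenna_pairs]
  rw [pv_d1 aps hk, pv_d2 aps hk]

-- ---- B's buckets and loop ----

theorem pv_bk (aps : List (Int × Int × String)) (a : String) :
    (aps.foldl (fun d p => d.modify (pvAnt p) [] (· ++ [pvKey p])) PySem.Dict.empty).getD a []
      = (aps.filter (fun q => pvAnt q == a)).map pvKey := by
  rw [pv_bk_fold]
  rw [PySem.Dict.getD_foldl_modify_append]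
  rw [show (PySem.Dict.empty : PySem.Dict String (List (Int × Int))).getD a [] = [] from rfl]
  simp [List.filter_map, List.map_map, Function.comp_def]

theorem pv_loopB (aps : List (Int × Int × String)) (bk : PySem.Dict String (List (Int × Int)))
    (hbk : ∀ a, bk.getD a [] = (aps.filter (fun q => pvAnt q == a)).map pvKey) :
    ∀ (suf pre : List (Int × Int × String)) (sd : PySem.Dict String Int)
      (res : PySem.Dict ((Int × Int) × (Int × Int)) String),
      aps = pre ++ suf →
      (∀ a, sd.getD a 0 = (pre.countP (fun q => pvAnt q == a) : Int)) →
      (suf.foldl (fun st p => (st.1.insert (pvAnt p) (st.1.getD (pvAnt p) 0 + 1),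
          (PySem.List.slice (bk.getD (pvAnt p) []) (some (st.1.getD (pvAnt p) 0 + 1)) none).foldl
            (fun r o => r.insert (pvSort2 (pvKey p) o) (pvAnt p)) st.2)) (sd, res)).2
      = (pvPairs suf).foldl (fun d e => d.insert e.1 e.2) res := by
  intro suf
  induction suf with
  | nil => intro pre sd res _ _; simp [pvPairs]
  | cons p suf ih =>
    intro pre sd res hsplit hcount
    rw [List.foldl_cons]
    have hk0 : sd.getD (pvAnt p) 0 = (pre.countP (fun q => pvAnt q == pvAnt p) : Int) :=
      hcount (pvAnt p)
    have hfilter : (aps.filter (fun q => pvAnt q == pvAnt p)).map pvKey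
        = ((pre.filter (fun q => pvAnt q == pvAnt p)).map pvKey ++ [pvKey p])
          ++ (suf.filter (fun q => pvAnt q == pvAnt p)).map pvKey := by
      rw [hsplit, List.filter_append, List.filter_cons]
      simp
    have hlen : ((pre.filter (fun q => pvAnt q == pvAnt p)).map pvKey ++ [pvKey p]).length
        = pre.countP (fun q => pvAnt q == pvAnt p) + 1 := by
      simp [List.countP_eq_length_filter]
    have hslice : PySem.List.slice (bk.getD (pvAnt p) []) (some (sd.getD (pvAnt p) 0 + 1)) none
        = (suf.filter (fun q => pvAnt q == pvAnt p)).map pvKey := by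
      rw [hbk, hk0, hfilter]
      rw [show ((pre.countP (fun q => pvAnt q == pvAnt p) : Int) + 1)
          = ((pre.countP (fun q => pvAnt q == pvAnt p) + 1 : Nat) : Int) by push_cast; ring]
      rw [PySem.List.slice_from_natCast]
      rw [← hlen, List.drop_left]
    have hcount' : ∀ a, (sd.insert (pvAnt p) (sd.getD (pvAnt p) 0 + 1)).getD a 0
        = ((pre ++ [p]).countP (fun q => pvAnt q == a) : Int) := by
      intro a
      rw [PySem.Dict.getD_insert]
      rw [List.countP_append]
      split_ifs with ha
      · subst ha
        rw [hk0]
        simp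
      · rw [hcount a]
        have hp0 : (pvAnt p == a) = false := by
          cases hpa : (pvAnt p == a)
          · rfl
          · exact absurd (eq_of_beq hpa).symm ha
        simp [hp0]
    rw [ih (pre ++ [p]) _ _ (by rw [hsplit, List.append_assoc]; rfl) hcount']
    rw [hslice, pv_inner_fold, List.map_map]
    simp only [pvPairs]
    rw [List.foldl_append]
    rfl

theorem pv_B_eq (aps : List (Int × Int × String)) (hk : (aps.map pvKey).Nodup) :
    get_antenna_pairs_alt aps = (pvPairs aps).map (fun e => (e.1.1, e.1.2, e.2)) := by
  simp only [get_antenna_pairs_alt]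
  rw [pv_loopB aps _ (pv_bk aps) aps [] PySem.Dict.empty PySem.Dict.empty rfl
    (by intro a; simp [show (PySem.Dict.empty : PySem.Dict String Int).getD a 0 = 0 from rfl])]
  have hfresh := PySem.Dict.items_foldl_insert_fresh (pvPairs aps) Prod.fst Prod.snd
    (PySem.Dict.empty : PySem.Dict ((Int × Int) × (Int × Int)) String)
    (by intro a _; simp) (pv_pairs_nodup aps hk)
  simp only [Prod.mk.eta] at hfresh
  rw [hfresh]
  simp [show (PySem.Dict.empty : PySem.Dict ((Int × Int) × (Int × Int)) String).items = [] from rfl]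

-- ===== VERDICT (by name: the statement is the Claim_ definition above) =====
theorem get_antenna_pairs_spec : Claim_equal_get_antenna_pairs := by
  intro aps _ hpre
  unfold Pre_get_antenna_pairs at hpre
  unfold Spec_get_antenna_pairs
  rw [pv_A_eq aps hpre, pv_B_eq aps hpre]
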